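-- pv_equiv track=rewrite | github.com/astory/coalescent-theory | lineage.py | convert_sequence
-- ===== SOURCE A (Python) =====
-- def convert_sequence(mutations, n_mutations):
--     sequence = []
--     for i in range(0, n_mutations):
--         if i in mutations:
--             sequence.append(1)
--         else:
--             sequence.append(0)
--     return sequence
-- ===== SOURCE B (Python) =====
-- def convert_sequence(mutations, n_mutations):
--     sequence = [0] * n_mutations
--     for m in mutations:
--         if 0 <= m < n_mutations:
--             sequence[m] = 1
--     return sequence
-- ===== Notes on version B (the rewrite author's own statement) =====
-- stated objective: alternative
-- what changed: B preallocates a zero array and scatters a 1 at each in-range mutation position, instead of scanning every index and testing membership in the mutations list.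
import Mathlib
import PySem

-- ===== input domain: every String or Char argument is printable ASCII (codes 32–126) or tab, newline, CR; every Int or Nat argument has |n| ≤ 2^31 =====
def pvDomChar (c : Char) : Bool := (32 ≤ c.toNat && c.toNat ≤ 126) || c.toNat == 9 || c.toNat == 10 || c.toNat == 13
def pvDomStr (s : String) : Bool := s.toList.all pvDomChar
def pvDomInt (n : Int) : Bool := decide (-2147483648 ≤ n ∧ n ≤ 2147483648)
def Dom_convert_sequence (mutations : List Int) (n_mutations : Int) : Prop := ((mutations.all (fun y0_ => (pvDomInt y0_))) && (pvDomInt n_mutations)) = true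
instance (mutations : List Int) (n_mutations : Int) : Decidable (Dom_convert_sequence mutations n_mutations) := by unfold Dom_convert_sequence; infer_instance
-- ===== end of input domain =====

-- B scatters a 1 at each in-range mutation position into a preallocated zero array,
-- instead of scanning every index and testing membership in the mutations list.

-- ===== PORT A =====
-- for i in range(0, n_mutations): sequence.append(1 if i in mutations else 0)
def convert_sequence (mutations : List Int) (n_mutations : Int) : List Int :=
  (PySem.List.pyRange 0 n_mutations 1).foldl
    (fun sequence i => if i ∈ mutations then sequence ++ [1] else sequence ++ [0]) []

-- ===== PORT B =====
-- sequence[m] = 1 for each m in mutations with 0 <= m < n_mutations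
def pvScatter (n : Int) (s : List Int) (m : Int) : List Int :=
  if 0 ≤ m ∧ m < n then s.set m.toNat 1 else s

def convert_sequence_alt (mutations : List Int) (n_mutations : Int) : List Int :=
  mutations.foldl (pvScatter n_mutations) (List.replicate n_mutations.toNat 0)

-- ===== PRECONDITION & SPEC =====
def Spec_convert_sequence (mutations : List Int) (n_mutations : Int) (out : List Int) : Prop := out = convert_sequence_alt mutations n_mutations
instance (mutations : List Int) (n_mutations : Int) (out : List Int) : Decidable (Spec_convert_sequence mutations n_mutations out) := by unfold Spec_convert_sequence; infer_instance

-- ===== CLAIM (what is proved, stated in full; the proofs are below) =====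
def Claim_equal_convert_sequence : Prop := ∀ (mutations : List Int) (n_mutations : Int), Dom_convert_sequence mutations n_mutations → Spec_convert_sequence mutations n_mutations (convert_sequence mutations n_mutations)

-- ===== LEMMAS AND PROOFS =====

theorem pvScatter_foldl_length (n : Int) (ms : List Int) (acc : List Int) :
    (ms.foldl (pvScatter n) acc).length = acc.length := by
  induction ms generalizing acc with
  | nil => rfl
  | cons m ms ih =>
    simp only [List.foldl_cons, ih]
    unfold pvScatter
    split_ifs <;> simp

theorem pvScatter_get (n m : Int) (acc : List Int) (j : Nat) (hj : j < acc.length) :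
    (pvScatter n acc m)[j]'(by unfold pvScatter; split_ifs <;> simpa) =
      if m = (j : Int) ∧ m < n then 1 else acc[j] := by
  by_cases hr : 0 ≤ m ∧ m < n
  · have hset : pvScatter n acc m = acc.set m.toNat 1 := by unfold pvScatter; rw [if_pos hr]
    simp only [hset, List.getElem_set]
    by_cases hmj : m.toNat = j
    · have hmeq : m = (j : Int) := by omega
      rw [if_pos hmj, if_pos ⟨hmeq, hr.2⟩]
    · have hne : ¬(m = (j : Int) ∧ m < n) := fun h => hmj (by omega)
      rw [if_neg hmj, if_neg hne]
  · have hset : pvScatter n acc m = acc := by unfold pvScatter; rw [if_neg hr]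
    have hne : ¬(m = (j : Int) ∧ m < n) := by rintro ⟨h1, h2⟩; omega
    simp only [hset, if_neg hne]

theorem pvScatter_foldl_get (n : Int) (ms : List Int) (acc : List Int) (j : Nat)
    (hj : j < acc.length) :
    (ms.foldl (pvScatter n) acc)[j]'(by rw [pvScatter_foldl_length]; exact hj) =
      if (j : Int) ∈ ms ∧ (j : Int) < n then 1 else acc[j] := by
  induction ms generalizing acc with
  | nil => simp
  | cons m ms ih =>
    have hlen : j < (pvScatter n acc m).length := by
      unfold pvScatter; split_ifs <;> simpa
    have hstep := ih (pvScatter n acc m) hlen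
    simp only [List.foldl_cons]
    rw [hstep, pvScatter_get n m acc j hj]
    simp only [List.mem_cons]
    by_cases hlt : (j : Int) < n
    · by_cases hms : (j : Int) ∈ ms
      · simp [hms, hlt]
      · by_cases hm : m = (j : Int)
        · simp [hms, hlt, hm]
        · have hjm : ¬((j : Int) = m) := fun h => hm h.symm
          simp [hms, hlt, hm, hjm]
    · simp only [hlt, and_false, if_false]
      split_ifs with h
      · exfalso; omega
      · rfl

theorem convert_sequence_eq_map (mutations : List Int) (n : Int) :
    convert_sequence mutations n =
      (List.range n.toNat).map (fun (k : Nat) => if ((k : Int) ∈ mutations) then (1 : Int) else 0) := by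
  unfold convert_sequence
  have h : ∀ (sequence : List Int) (i : Int),
      (if i ∈ mutations then sequence ++ [1] else sequence ++ [0]) =
        sequence ++ [if i ∈ mutations then (1 : Int) else 0] := by
    intro s i; split_ifs <;> rfl
  simp only [h]
  rw [PySem.List.foldl_append_singleton_eq_map, PySem.List.pyRange_one, List.map_map]
  simp [Function.comp_def]

theorem convert_sequence_spec' (mutations : List Int) (n_mutations : Int) :
    convert_sequence mutations n_mutations = convert_sequence_alt mutations n_mutations := by
  rw [convert_sequence_eq_map]
  unfold convert_sequence_alt
  apply List.ext_getElem
  · rw [pvScatter_foldl_length]; simp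
  · intro j hj hj'
    have hjlt : j < n_mutations.toNat := by simpa using hj
    have hjn : (j : Int) < n_mutations := by omega
    have hlen : j < (List.replicate n_mutations.toNat (0 : Int)).length := by simpa
    rw [pvScatter_foldl_get n_mutations mutations _ j hlen]
    simp [hjn, List.getElem_map, List.getElem_range]

-- ===== VERDICT (by name: the statement is the Claim_ definition above) =====
theorem convert_sequence_spec : Claim_equal_convert_sequence := by
  intro mutations n_mutations _
  unfold Spec_convert_sequence
  exact convert_sequence_spec' mutations n_mutations
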